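-- pv_equiv track=rewrite | github.com/asinusMZ/Lucas_Leonardo_EP2 | funcoes.py | calcula_pontos_regra_simples
-- ===== SOURCE A (Python) =====
-- def calcula_pontos_regra_simples(rolados):
--
--     cat1 = 0
--     cat2 = 0
--     cat3 = 0
--     cat4 = 0
--     cat5 = 0
--     cat6 = 0
--
--     for dado in rolados:
--         if dado == 1:
--             cat1 += 1
--         elif dado == 2:
--             cat2 += 2
--         elif dado == 3:
--             cat3 += 3
--         elif dado == 4:
--             cat4 += 4
--         elif dado == 5:
--             cat5 += 5
--         elif dado == 6:
--             cat6 += 6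
--
--     calculo = {}
--
--     calculo[1] = cat1
--     calculo[2] = cat2
--     calculo[3] = cat3
--     calculo[4] = cat4
--     calculo[5] = cat5
--     calculo[6] = cat6
--
--     return calculo
-- ===== SOURCE B (Python) =====
-- def calcula_pontos_regra_simples(rolados):
--     return {f: f * rolados.count(f) for f in range(1, 7)}
-- ===== Notes on version B (the rewrite author's own statement) =====
-- stated objective: idiomatic
-- what changed: Replaces the six branch-driven accumulator variables updated element-by-element with a count-then-scale dict comprehension over the faces 1..6 (result[f] = f * rolados.count(f)).
import Mathlib
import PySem

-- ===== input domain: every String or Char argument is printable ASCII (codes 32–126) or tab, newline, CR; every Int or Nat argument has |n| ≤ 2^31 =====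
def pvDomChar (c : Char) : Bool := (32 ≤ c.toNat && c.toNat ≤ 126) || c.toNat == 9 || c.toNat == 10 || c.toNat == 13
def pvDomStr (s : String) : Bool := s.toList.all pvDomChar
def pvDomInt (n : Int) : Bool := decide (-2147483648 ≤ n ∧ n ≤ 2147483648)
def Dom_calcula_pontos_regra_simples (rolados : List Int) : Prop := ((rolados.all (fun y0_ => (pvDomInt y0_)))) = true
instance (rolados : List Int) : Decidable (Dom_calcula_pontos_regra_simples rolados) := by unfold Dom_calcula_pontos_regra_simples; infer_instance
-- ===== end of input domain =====

-- B replaces the six per-element branch accumulators with a count-then-scale comprehension over faces 1..6 (idiomatic, same cost).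
-- ===== PORT A =====
-- Literal port of A: one fold over the list keeping the six category accumulators,
-- then the dict [1..6] is built in key order.
def pvStepA (s : Int × Int × Int × Int × Int × Int) (dado : Int) : Int × Int × Int × Int × Int × Int :=
  let (c1, c2, c3, c4, c5, c6) := s
  if dado == 1 then (c1 + 1, c2, c3, c4, c5, c6)
  else if dado == 2 then (c1, c2 + 2, c3, c4, c5, c6)
  else if dado == 3 then (c1, c2, c3 + 3, c4, c5, c6)
  else if dado == 4 then (c1, c2, c3, c4 + 4, c5, c6)
  else if dado == 5 then (c1, c2, c3, c4, c5 + 5, c6)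
  else if dado == 6 then (c1, c2, c3, c4, c5, c6 + 6)
  else (c1, c2, c3, c4, c5, c6)

def calcula_pontos_regra_simples (rolados : List Int) : List (Int × Int) :=
  let (c1, c2, c3, c4, c5, c6) := rolados.foldl pvStepA (0, 0, 0, 0, 0, 0)
  [(1, c1), (2, c2), (3, c3), (4, c4), (5, c5), (6, c6)]

-- ===== PORT B =====
-- Port of B: count-then-scale comprehension over the faces 1..6.
def calcula_pontos_regra_simples_alt (rolados : List Int) : List (Int × Int) :=
  (PySem.List.pyRange 1 7 1).map (fun f => (f, f * (PySem.List.count rolados f : Int)))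

-- ===== PRECONDITION & SPEC =====
def Spec_calcula_pontos_regra_simples (rolados : List Int) (out : List (Int × Int)) : Prop := out = calcula_pontos_regra_simples_alt rolados
instance (rolados : List Int) (out : List (Int × Int)) : Decidable (Spec_calcula_pontos_regra_simples rolados out) := by unfold Spec_calcula_pontos_regra_simples; infer_instance

-- ===== CLAIM (what is proved, stated in full; the proofs are below) =====
def Claim_equal_calcula_pontos_regra_simples : Prop := ∀ (rolados : List Int), Dom_calcula_pontos_regra_simples rolados → Spec_calcula_pontos_regra_simples rolados (calcula_pontos_regra_simples rolados)

-- ===== LEMMAS AND PROOFS =====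
theorem foldA_eq (l : List Int) (c1 c2 c3 c4 c5 c6 : Int) :
    l.foldl pvStepA (c1, c2, c3, c4, c5, c6) =
      (c1 + (l.count 1 : Int), c2 + 2 * (l.count 2 : Int), c3 + 3 * (l.count 3 : Int),
       c4 + 4 * (l.count 4 : Int), c5 + 5 * (l.count 5 : Int), c6 + 6 * (l.count 6 : Int)) := by
  induction l generalizing c1 c2 c3 c4 c5 c6 with
  | nil => simp
  | cons d t ih =>
    simp only [List.foldl_cons, List.count_cons, pvStepA]
    split_ifs with h1 h2 h3 h4 h5 h6 <;> simp_all [beq_iff_eq] <;> ring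

-- ===== VERDICT (by name: the statement is the Claim_ definition above) =====
theorem calcula_pontos_regra_simples_spec : Claim_equal_calcula_pontos_regra_simples := by
  intro rolados _
  unfold Spec_calcula_pontos_regra_simples
  simp [calcula_pontos_regra_simples, calcula_pontos_regra_simples_alt, foldA_eq,
    PySem.List.count_eq, PySem.List.pyRange]
  norm_num [List.range_succ]
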